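-- pv_equiv track=rewrite | github.com/Gautreaux/AOC-Python | Solutions2023/y2023d1.py | p2_tokens_brute
-- ===== SOURCE A (Python) =====
-- from typing import Iterator
--
-- def p2_tokens_brute(line: str) -> Iterator[int]:
--
--     words = ['one', 'two', 'three', 'four', 'five', 'six', 'seven', 'eight', 'nine']
--
--     for i in range(len(line)):
--         if line[i] in '0123456789':
--             yield int(line[i])
--
--         for d, n in enumerate(words):
--             if line.startswith(n, i):
--                 yield d+1
-- ===== SOURCE B (Python) =====
-- def p2_tokens_brute(line: str):
--     # Token-major staged passes: collect every occurrence of each token with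
--     # str.find, then merge all hits into left-to-right order with one sort.
--     tokens = {'0': 0, '1': 1, '2': 2, '3': 3, '4': 4, '5': 5, '6': 6, '7': 7,
--               '8': 8, '9': 9, 'one': 1, 'two': 2, 'three': 3, 'four': 4,
--               'five': 5, 'six': 6, 'seven': 7, 'eight': 8, 'nine': 9}
--     hits = []
--     for tok, val in tokens.items():
--         pos = line.find(tok)
--         while pos != -1:
--             hits.append((pos, val))
--             pos = line.find(tok, pos + 1)
--     hits.sort(key=lambda h: h[0])
--     for _, val in hits:
--         yield val
-- ===== Notes on version B (the rewrite author's own statement) =====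
-- stated objective: faster
-- what changed: A scans positions left to right, testing a digit and all nine spelled words at every index; B is token-major: it collects every occurrence of each of the 19 tokens with repeated str.find, then merges all hits into left-to-right order with a single sort by position.
import Mathlib
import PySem

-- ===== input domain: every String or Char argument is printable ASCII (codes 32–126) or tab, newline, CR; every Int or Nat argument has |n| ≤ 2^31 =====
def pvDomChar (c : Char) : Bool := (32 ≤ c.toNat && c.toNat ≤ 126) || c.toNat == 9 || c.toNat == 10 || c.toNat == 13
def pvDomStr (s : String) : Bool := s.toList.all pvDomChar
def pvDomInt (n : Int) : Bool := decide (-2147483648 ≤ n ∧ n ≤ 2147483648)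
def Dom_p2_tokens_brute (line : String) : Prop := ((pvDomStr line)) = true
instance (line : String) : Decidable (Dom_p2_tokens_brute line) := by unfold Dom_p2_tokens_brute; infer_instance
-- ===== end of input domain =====

-- ===== PORT A =====
-- B replaces A's position-major scan (digit test + 9 startswith probes at every index)
-- by a token-major collection: all occurrences of each of the 19 tokens via repeated
-- str.find, merged into left-to-right order by one sort (measured faster, constant factor).
-- A is a generator; both ports return the yielded values as a list.
def pvWords : List (List Char) :=
  [['o','n','e'], ['t','w','o'], ['t','h','r','e','e'], ['f','o','u','r'], ['f','i','v','e'],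
   ['s','i','x'], ['s','e','v','e','n'], ['e','i','g','h','t'], ['n','i','n','e']]

def p2_tokens_brute (line : String) : List Int :=
  let cs := line.toList
  (PySem.List.pyRange 0 (PySem.Str.len line) 1).foldl (fun acc i =>
    let acc1 :=
      match PySem.List.pyGet? cs i with
      | some c =>
          if PySem.Chars.isIn [c] ['0','1','2','3','4','5','6','7','8','9'] then
            acc ++ [(PySem.Int.ofChars? [c]).getD 0]   -- int(line[i]); the digit guard makes ofChars? a some here
          else acc
      | none => acc   -- unreachable: i ranges over 0..len(line)-1
    (PySem.List.enumerate pvWords 0).foldl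
      (fun acc2 p =>
        -- line.startswith(n, i) is exact as a prefix test on the suffix from i (here 0 <= i)
        if PySem.Chars.startswith (cs.drop i.toNat) p.2 then acc2 ++ [p.1 + 1] else acc2) acc1) []

-- ===== PORT B =====
-- tokens dict in insertion order: the ten digit chars, then the nine spelled words
def pvTokens : List (List Char × Int) :=
  [(['0'],0),(['1'],1),(['2'],2),(['3'],3),(['4'],4),(['5'],5),(['6'],6),(['7'],7),(['8'],8),(['9'],9),
   (['o','n','e'],1),(['t','w','o'],2),(['t','h','r','e','e'],3),(['f','o','u','r'],4),(['f','i','v','e'],5),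
   (['s','i','x'],6),(['s','e','v','e','n'],7),(['e','i','g','h','t'],8),(['n','i','n','e'],9)]

-- the 'pos = line.find(tok); while pos != -1: hits.append((pos, val)); pos = line.find(tok, pos+1)'
-- loop; fuel (cs.length + 1 at the top call) only makes the recursion structurally total
def pvFindAll (cs tok : List Char) (v : Int) : Nat → Nat → List (Int × Int)
  | 0, _ => []
  | fuel + 1, start =>
      let p := PySem.Chars.findFrom cs tok (start : Int) none
      if p = -1 then [] else (p, v) :: pvFindAll cs tok v fuel (p.toNat + 1)

def p2_tokens_brute_alt (line : String) : List Int :=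
  let cs := line.toList
  let hits := pvTokens.foldl (fun acc tv => acc ++ pvFindAll cs tv.1 tv.2 (cs.length + 1) 0) []
  (PySem.List.sorted hits (fun h => h.1)).map (fun h => h.2)

-- ===== PRECONDITION & SPEC =====
def Spec_p2_tokens_brute (line : String) (out : List Int) : Prop := out = p2_tokens_brute_alt line
instance (line : String) (out : List Int) : Decidable (Spec_p2_tokens_brute line out) := by unfold Spec_p2_tokens_brute; infer_instance

-- ===== CLAIM (what is proved, stated in full; the proofs are below) =====
def Claim_equal_p2_tokens_brute : Prop := ∀ (line : String), Dom_p2_tokens_brute line → Spec_p2_tokens_brute line (p2_tokens_brute line)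

-- ===== LEMMAS AND PROOFS =====

-- A's per-position yields, as functions of the suffix starting at that position
def pvHeadTok (s : List Char) : List Int :=
  match s.head? with
  | some c =>
      if PySem.Chars.isIn [c] ['0','1','2','3','4','5','6','7','8','9'] then
        [(PySem.Int.ofChars? [c]).getD 0]
      else []
  | none => []

def pvWordToks (s : List Char) : List Int :=
  ((PySem.List.enumerate pvWords 0).filter (fun p => PySem.Chars.startswith s p.2)).map (fun p => p.1 + 1)

-- A's (position, value) pairs, position-major
def pvPairs (cs : List Char) : List (Int × Int) :=
  (List.range cs.length).flatMap
    (fun i => (pvHeadTok (cs.drop i) ++ pvWordToks (cs.drop i)).map (fun v => ((i : Int), v)))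

lemma pv_body (cs : List Char) (acc : List Int) (i : Int) :
    (fun acc (i : Int) =>
      let acc1 :=
        match PySem.List.pyGet? cs i with
        | some c =>
            if PySem.Chars.isIn [c] ['0','1','2','3','4','5','6','7','8','9'] then
              acc ++ [(PySem.Int.ofChars? [c]).getD 0]
            else acc
        | none => acc
      (PySem.List.enumerate pvWords 0).foldl
        (fun acc2 p =>
          if PySem.Chars.startswith (cs.drop i.toNat) p.2 then acc2 ++ [p.1 + 1] else acc2) acc1) acc i
    = acc ++ ((match PySem.List.pyGet? cs i with
        | some c =>
            if PySem.Chars.isIn [c] ['0','1','2','3','4','5','6','7','8','9'] then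
              [(PySem.Int.ofChars? [c]).getD 0]
            else []
        | none => []) ++ pvWordToks (cs.drop i.toNat)) := by
  simp only [PySem.List.foldl_append_if, pvWordToks]
  cases PySem.List.pyGet? cs i with
  | none => simp
  | some c => by_cases h : PySem.Chars.isIn [c] ['0','1','2','3','4','5','6','7','8','9'] = true <;> simp [h]

lemma pv_A_flat (line : String) :
    p2_tokens_brute line
      = (List.range line.toList.length).flatMap
          (fun k => pvHeadTok (line.toList.drop k) ++ pvWordToks (line.toList.drop k)) := by
  unfold p2_tokens_brute
  have hfun :
      (fun (acc : List Int) (i : Int) =>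
        let acc1 :=
          match PySem.List.pyGet? line.toList i with
          | some c =>
              if PySem.Chars.isIn [c] ['0','1','2','3','4','5','6','7','8','9'] then
                acc ++ [(PySem.Int.ofChars? [c]).getD 0]
              else acc
          | none => acc
        (PySem.List.enumerate pvWords 0).foldl
          (fun acc2 p =>
            if PySem.Chars.startswith (line.toList.drop i.toNat) p.2 then acc2 ++ [p.1 + 1] else acc2) acc1)
      = fun acc i => acc ++ ((match PySem.List.pyGet? line.toList i with
          | some c =>
              if PySem.Chars.isIn [c] ['0','1','2','3','4','5','6','7','8','9'] then
                [(PySem.Int.ofChars? [c]).getD 0]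
              else []
          | none => []) ++ pvWordToks (line.toList.drop i.toNat)) := by
    funext acc i; exact pv_body line.toList acc i
  simp only []
  rw [hfun, PySem.List.foldl_append_eq_flatMap]
  rw [PySem.Str.len_eq, PySem.List.pyRange_one]
  simp [List.flatMap_map, pvHeadTok, List.head?_drop]

lemma pv_A_pairs (line : String) :
    p2_tokens_brute line = (pvPairs line.toList).map (fun q => q.2) := by
  rw [pv_A_flat, pvPairs, List.map_flatMap]
  refine List.flatMap_congr (fun k _ => ?_)
  rw [List.map_map]
  simp

lemma pv_prefix_drop_infix {tok cs : List Char} {start i : Nat}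
    (hsi : start ≤ i) (h : tok <+: cs.drop i) : tok <:+: cs.drop start := by
  obtain ⟨r, hr⟩ := h
  refine ⟨(cs.drop start).take (i - start), r, ?_⟩
  have hd : List.drop i cs = List.drop (i - start) (List.drop start cs) := by
    rw [List.drop_drop]; congr 1; omega
  rw [List.append_assoc, hr, hd, List.take_append_drop]

lemma pv_filter_split (n s p : Nat) (P : Nat → Prop) [DecidablePred P]
    (hsp : s ≤ p) (hpn : p < n) (hP : P p) (hmin : ∀ i, s ≤ i → i < p → ¬ P i) :
    (List.range n).filter (fun i => s ≤ i ∧ P i) = p :: (List.range n).filter (fun i => p + 1 ≤ i ∧ P i) := by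
  have hn : n = (p + 1) + (n - (p + 1)) := by omega
  rw [hn, List.range_add, List.range_succ, List.filter_append, List.filter_append,
    List.filter_append, List.filter_append]
  have hlow1 : (List.range p).filter (fun i => s ≤ i ∧ P i) = [] := by
    rw [List.filter_eq_nil_iff]
    intro i hi
    simp only [List.mem_range] at hi
    simp only [decide_eq_true_eq, not_and]
    intro hsi
    exact hmin i hsi hi
  have hlow2 : (List.range p).filter (fun i => p + 1 ≤ i ∧ P i) = [] := by
    rw [List.filter_eq_nil_iff]
    intro i hi
    simp only [List.mem_range] at hi
    simp only [decide_eq_true_eq, not_and]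
    omega
  have hmid1 : [p].filter (fun i => s ≤ i ∧ P i) = [p] := by simp [hsp, hP]
  have hmid2 : [p].filter (fun i => p + 1 ≤ i ∧ P i) = [] := by simp
  have hhigh : ((List.range (n - (p + 1))).map (fun x => p + 1 + x)).filter (fun i => s ≤ i ∧ P i)
      = ((List.range (n - (p + 1))).map (fun x => p + 1 + x)).filter (fun i => p + 1 ≤ i ∧ P i) := by
    refine List.filter_congr (fun x hx => ?_)
    obtain ⟨y, -, rfl⟩ := List.mem_map.mp hx
    have h1 : s ≤ p + 1 + y := by omega
    have h2 : p + 1 ≤ p + 1 + y := by omega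
    simp [h1, h2]
  rw [hlow1, hlow2, hmid1, hmid2, hhigh]
  rfl

-- the find/while loop lists exactly the match positions from `start` on, in increasing order
lemma pv_findAll_eq (cs tok : List Char) (v : Int) (htok : tok ≠ []) :
    ∀ fuel start, start ≤ cs.length → cs.length + 1 ≤ fuel + start →
      pvFindAll cs tok v fuel start =
        ((List.range cs.length).filter (fun i => start ≤ i ∧ tok <+: cs.drop i)).map
          (fun i : Nat => ((i : Int), v)) := by
  intro fuel
  induction fuel with
  | zero => intro start h1 h2; omega
  | succ f ih =>
    intro start h1 h2
    simp only [pvFindAll]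
    by_cases hp : PySem.Chars.findFrom cs tok (start : Int) none = -1
    · rw [if_pos hp]
      have hno : ¬ tok <:+: cs.drop start := (PySem.Chars.findFrom_natCast_eq_neg_one_iff cs tok start h1).mp hp
      have : (List.range cs.length).filter (fun i => start ≤ i ∧ tok <+: cs.drop i) = [] := by
        rw [List.filter_eq_nil_iff]
        rintro i - hi
        simp only [decide_eq_true_eq] at hi
        exact hno (pv_prefix_drop_infix hi.1 hi.2)
      rw [this]; rfl
    · rw [if_neg hp]
      obtain ⟨hge, hpre, hmin⟩ := PySem.Chars.findFrom_natCast_spec cs tok start h1 hp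
      set p := PySem.Chars.findFrom cs tok (start : Int) none with hpdef
      have hp0 : 0 ≤ p := le_trans (by exact_mod_cast Int.natCast_nonneg start) hge
      have hsp : start ≤ p.toNat := by omega
      have hpn : p.toNat < cs.length := by
        have hne : cs.drop p.toNat ≠ [] := by
          intro hnil
          rw [hnil] at hpre
          exact htok (List.prefix_nil.mp hpre)
        rw [ne_eq, List.drop_eq_nil_iff] at hne
        omega
      rw [ih (p.toNat + 1) (by omega) (by omega)]
      rw [pv_filter_split cs.length start p.toNat (fun i => tok <+: cs.drop i) hsp hpn hpre
        (fun i hsi hip => hmin i hsi hip)]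
      simp [Int.toNat_of_nonneg hp0]

-- B's hit list, token-major
def pvHits (cs : List Char) : List (Int × Int) :=
  pvTokens.flatMap (fun tv => pvFindAll cs tv.1 tv.2 (cs.length + 1) 0)

lemma pv_B_eq (line : String) :
    p2_tokens_brute_alt line
      = (PySem.List.sorted (pvHits line.toList) (fun h => h.1)).map (fun h => h.2) := by
  unfold p2_tokens_brute_alt pvHits
  simp only [PySem.List.foldl_append_eq_flatMap, List.nil_append]

lemma pv_tok_ne_nil : ∀ tv ∈ pvTokens, tv.1 ≠ [] := by decide

lemma pv_mem_hits (cs : List Char) (q : Int × Int) :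
    q ∈ pvHits cs ↔ ∃ t, (t, q.2) ∈ pvTokens ∧ ∃ i < cs.length, q.1 = (i : Int) ∧ t <+: cs.drop i := by
  simp only [pvHits, List.mem_flatMap]
  constructor
  · rintro ⟨tv, htv, hq⟩
    rw [pv_findAll_eq cs tv.1 tv.2 (pv_tok_ne_nil tv htv) (cs.length + 1) 0 (Nat.zero_le _) (by omega)] at hq
    obtain ⟨i, hi, rfl⟩ := List.mem_map.mp hq
    obtain ⟨hir, hcond⟩ := List.mem_filter.mp hi
    simp only [decide_eq_true_eq] at hcond
    exact ⟨tv.1, htv, i, List.mem_range.mp hir, rfl, hcond.2⟩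
  · rintro ⟨t, ht, i, hi, hq1, hts⟩
    refine ⟨(t, q.2), ht, ?_⟩
    rw [pv_findAll_eq cs t q.2 (pv_tok_ne_nil _ ht) (cs.length + 1) 0 (Nat.zero_le _) (by omega)]
    refine List.mem_map.mpr ⟨i, List.mem_filter.mpr ⟨List.mem_range.mpr hi, by simp only [decide_eq_true_eq]; exact ⟨Nat.zero_le _, hts⟩⟩, ?_⟩
    rw [← hq1]

lemma pv_mem_pairs (cs : List Char) (q : Int × Int) :
    q ∈ pvPairs cs ↔ ∃ i < cs.length, q.1 = (i : Int) ∧ q.2 ∈ pvHeadTok (cs.drop i) ++ pvWordToks (cs.drop i) := by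
  simp only [pvPairs, List.mem_flatMap, List.mem_range, List.mem_map]
  constructor
  · rintro ⟨i, hi, v, hv, rfl⟩
    exact ⟨i, hi, rfl, hv⟩
  · rintro ⟨i, hi, hq1, hv⟩
    exact ⟨i, hi, q.2, hv, by rw [← hq1]⟩

-- per-position bridge: A's per-position values are exactly the values of tokens matching there
lemma pv_bridge (s : List Char) (v : Int) :
    v ∈ pvHeadTok s ++ pvWordToks s ↔ ∃ t, (t, v) ∈ pvTokens ∧ t <+: s := by
  constructor
  · rw [List.mem_append]
    rintro (hh | hw)
    · unfold pvHeadTok at hh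
      cases s with
      | nil => simp at hh
      | cons c r =>
        simp only [List.head?_cons] at hh
        by_cases hd : PySem.Chars.isIn [c] ['0','1','2','3','4','5','6','7','8','9'] = true
        · rw [if_pos hd, List.mem_singleton] at hh
          rw [PySem.Chars.isIn_iff_infix, List.singleton_infix_iff] at hd
          subst hh
          fin_cases hd <;> exact ⟨[_], by decide, _, rfl⟩
        · rw [if_neg hd] at hh; simp at hh
    · unfold pvWordToks at hw
      obtain ⟨pair, hp, rfl⟩ := List.mem_map.mp hw
      obtain ⟨hpe, hsw⟩ := List.mem_filter.mp hp
      have hpre : pair.2 <+: s := (PySem.Chars.startswith_iff _ _).mp hsw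
      fin_cases hpe <;> exact ⟨_, by decide, hpre⟩
  · rintro ⟨t, ht, hts⟩
    fin_cases ht <;> obtain ⟨r, rfl⟩ := hts <;>
      first
      | (refine List.mem_append.mpr (Or.inl ?_);
         simp only [pvHeadTok, List.singleton_append, List.head?_cons];
         rw [if_pos (by decide)];
         simp only [List.mem_singleton];
         decide)
      | exact List.mem_append.mpr (Or.inr (List.mem_map.mpr ⟨((0 : Int), ['o','n','e']), List.mem_filter.mpr ⟨by decide, (PySem.Chars.startswith_iff _ _).mpr ⟨r, rfl⟩⟩, by decide⟩))
      | exact List.mem_append.mpr (Or.inr (List.mem_map.mpr ⟨((1 : Int), ['t','w','o']), List.mem_filter.mpr ⟨by decide, (PySem.Chars.startswith_iff _ _).mpr ⟨r, rfl⟩⟩, by decide⟩))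
      | exact List.mem_append.mpr (Or.inr (List.mem_map.mpr ⟨((2 : Int), ['t','h','r','e','e']), List.mem_filter.mpr ⟨by decide, (PySem.Chars.startswith_iff _ _).mpr ⟨r, rfl⟩⟩, by decide⟩))
      | exact List.mem_append.mpr (Or.inr (List.mem_map.mpr ⟨((3 : Int), ['f','o','u','r']), List.mem_filter.mpr ⟨by decide, (PySem.Chars.startswith_iff _ _).mpr ⟨r, rfl⟩⟩, by decide⟩))
      | exact List.mem_append.mpr (Or.inr (List.mem_map.mpr ⟨((4 : Int), ['f','i','v','e']), List.mem_filter.mpr ⟨by decide, (PySem.Chars.startswith_iff _ _).mpr ⟨r, rfl⟩⟩, by decide⟩))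
      | exact List.mem_append.mpr (Or.inr (List.mem_map.mpr ⟨((5 : Int), ['s','i','x']), List.mem_filter.mpr ⟨by decide, (PySem.Chars.startswith_iff _ _).mpr ⟨r, rfl⟩⟩, by decide⟩))
      | exact List.mem_append.mpr (Or.inr (List.mem_map.mpr ⟨((6 : Int), ['s','e','v','e','n']), List.mem_filter.mpr ⟨by decide, (PySem.Chars.startswith_iff _ _).mpr ⟨r, rfl⟩⟩, by decide⟩))
      | exact List.mem_append.mpr (Or.inr (List.mem_map.mpr ⟨((7 : Int), ['e','i','g','h','t']), List.mem_filter.mpr ⟨by decide, (PySem.Chars.startswith_iff _ _).mpr ⟨r, rfl⟩⟩, by decide⟩))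
      | exact List.mem_append.mpr (Or.inr (List.mem_map.mpr ⟨((8 : Int), ['n','i','n','e']), List.mem_filter.mpr ⟨by decide, (PySem.Chars.startswith_iff _ _).mpr ⟨r, rfl⟩⟩, by decide⟩))

-- no two distinct table entries can match at the same position
lemma pv_uniq (s : List Char) (p q : List Char × Int)
    (hp : p ∈ pvTokens) (hq : q ∈ pvTokens) (hps : p.1 <+: s) (hqs : q.1 <+: s) : p = q := by
  have hall : ∀ a ∈ pvTokens, ∀ b ∈ pvTokens, a.1 <+: b.1 → a = b := by decide
  rcases List.prefix_or_prefix_of_prefix hps hqs with h | h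
  · exact hall p hp q hq h
  · exact (hall q hq p hp h).symm

lemma pv_filter_len_le_one {α : Type} (l : List α) (p : α → Bool)
    (h : ∀ a ∈ l, ∀ b ∈ l, p a → p b → a = b) (hnd : l.Nodup) : (l.filter p).length ≤ 1 := by
  induction l with
  | nil => simp
  | cons a t ih =>
    rw [List.filter_cons]
    by_cases hpa : p a = true
    · rw [if_pos hpa]
      have ht : t.filter p = [] := by
        rw [List.filter_eq_nil_iff]
        intro b hb hpb
        have : a = b := h a List.mem_cons_self b (List.mem_cons_of_mem a hb) hpa hpb
        exact (List.nodup_cons.mp hnd).1 (this ▸ hb)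
      rw [ht]; simp
    · rw [if_neg hpa]
      exact ih (fun x hx y hy => h x (List.mem_cons_of_mem a hx) y (List.mem_cons_of_mem a hy))
        (List.nodup_cons.mp hnd).2

lemma pv_aTok_len (s : List Char) : (pvHeadTok s ++ pvWordToks s).length ≤ 1 := by
  cases s with
  | nil => decide
  | cons c r =>
    by_cases hd : PySem.Chars.isIn [c] ['0','1','2','3','4','5','6','7','8','9'] = true
    · have hw : pvWordToks (c :: r) = [] := by
        unfold pvWordToks
        rw [List.map_eq_nil_iff, List.filter_eq_nil_iff]
        intro pair hpair hsw
        fin_cases hpair <;>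
          · obtain ⟨rfl, -⟩ := List.cons_prefix_cons.mp ((PySem.Chars.startswith_iff _ _).mp hsw)
            exact absurd hd (by decide)
      simp [pvHeadTok, hd, hw]
    · have hh : pvHeadTok (c :: r) = [] := by simp [pvHeadTok, hd]
      rw [hh, List.nil_append]
      unfold pvWordToks
      rw [List.length_map]
      refine pv_filter_len_le_one _ _ ?_ (by decide)
      intro a ha b hb hpa hpb
      have h1 : a.2 <+: (c :: r) := (PySem.Chars.startswith_iff _ _).mp hpa
      have h2 : b.2 <+: (c :: r) := (PySem.Chars.startswith_iff _ _).mp hpb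
      have hall : ∀ x ∈ PySem.List.enumerate pvWords 0, ∀ y ∈ PySem.List.enumerate pvWords 0,
          x.2 <+: y.2 → x = y := by decide
      rcases List.prefix_or_prefix_of_prefix h1 h2 with h | h
      · exact hall a ha b hb h
      · exact (hall b hb a ha h).symm

lemma pv_pairs_pairwise (cs : List Char) :
    (pvPairs cs).Pairwise (fun a b => a.1 < b.1) := by
  unfold pvPairs
  rw [List.pairwise_flatMap]
  constructor
  · intro i _
    have hlen := pv_aTok_len (cs.drop i)
    cases hl : (pvHeadTok (cs.drop i) ++ pvWordToks (cs.drop i)) with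
    | nil => simp
    | cons a t =>
      cases t with
      | nil => simp
      | cons b u => rw [hl] at hlen; simp at hlen
  · refine List.Pairwise.imp ?_ (List.pairwise_lt_range (n := cs.length))
    intro i j hij x hx y hy
    obtain ⟨v, -, rfl⟩ := List.mem_map.mp hx
    obtain ⟨w, -, rfl⟩ := List.mem_map.mp hy
    simpa using hij

lemma pv_pairs_nodup (cs : List Char) : (pvPairs cs).Nodup :=
  (pv_pairs_pairwise cs).imp (fun h => by rintro rfl; exact lt_irrefl _ h)

lemma pv_hits_nodup (cs : List Char) : (pvHits cs).Nodup := by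
  show List.Pairwise _ _
  unfold pvHits
  rw [List.pairwise_flatMap]
  constructor
  · intro tv htv
    rw [pv_findAll_eq cs tv.1 tv.2 (pv_tok_ne_nil tv htv) (cs.length + 1) 0 (Nat.zero_le _) (by omega)]
    refine List.Nodup.map ?_ (List.Nodup.filter _ List.nodup_range)
    intro a b hab
    simpa using hab
  · refine List.Pairwise.imp_of_mem ?_ (by decide : pvTokens.Pairwise (· ≠ ·))
    intro a b ha hb hne x hx y hy heq
    rw [pv_findAll_eq cs a.1 a.2 (pv_tok_ne_nil a ha) (cs.length + 1) 0 (Nat.zero_le _) (by omega)] at hx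
    rw [pv_findAll_eq cs b.1 b.2 (pv_tok_ne_nil b hb) (cs.length + 1) 0 (Nat.zero_le _) (by omega)] at hy
    obtain ⟨i, hi, rfl⟩ := List.mem_map.mp hx
    obtain ⟨j, hj, rfl⟩ := List.mem_map.mp hy
    obtain ⟨hic, hcond⟩ := List.mem_filter.mp hi
    obtain ⟨hjc, hcond'⟩ := List.mem_filter.mp hj
    simp only [decide_eq_true_eq] at hcond hcond'
    have hij : i = j := by have := congrArg Prod.fst heq; simp only [] at this; exact_mod_cast this
    subst hij
    have hab : a = b := pv_uniq (cs.drop i) a b ha hb hcond.2 hcond'.2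
    exact hne hab

lemma pv_perm (cs : List Char) : (pvPairs cs).Perm (pvHits cs) := by
  rw [List.perm_ext_iff_of_nodup (pv_pairs_nodup cs) (pv_hits_nodup cs)]
  intro q
  rw [pv_mem_pairs, pv_mem_hits]
  constructor
  · rintro ⟨i, hi, hq1, hv⟩
    obtain ⟨t, ht, hts⟩ := (pv_bridge _ _).mp hv
    exact ⟨t, ht, i, hi, hq1, hts⟩
  · rintro ⟨t, ht, i, hi, hq1, hts⟩
    exact ⟨i, hi, hq1, (pv_bridge _ _).mpr ⟨t, ht, hts⟩⟩

-- ===== VERDICT (by name: the statement is the Claim_ definition above) =====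
theorem p2_tokens_brute_spec : Claim_equal_p2_tokens_brute := by
  intro line _
  unfold Spec_p2_tokens_brute
  rw [pv_B_eq, PySem.List.sorted_eq_of_perm_of_pairwise_lt _ _ _ (pv_perm line.toList) (pv_pairs_pairwise line.toList)]
  exact pv_A_pairs line
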